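-- pv_equiv track=rewrite | github.com/Hash-lee/algorithm | 프로그래머스/unrated/138476. 귤 고르기/귤 고르기.py | solution
-- ===== SOURCE A (Python) =====
-- def solution(k, tangerine):
--     dic = {}
--     for tan in tangerine:
--         dic[tan] = dic[tan] + 1 if dic.get(tan, 0) else 1
--     lst = sorted(dic.values(), reverse=True)
--     answer = 0
--     while 0 < k:
--         k -= lst[answer]
--         answer += 1
--     return answer
-- ===== SOURCE B (Python) =====
-- def solution(k, tangerine):
--     freq = {}
--     for t in tangerine:
--         freq[t] = freq.get(t, 0) + 1
--     n = len(tangerine)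
--     bucket = [0] * (n + 1)
--     for c in freq.values():
--         bucket[c] += 1
--     answer = 0
--     f = n
--     while k > 0 and f > 0:
--         take = min(bucket[f], -(-k // f))
--         answer += take
--         k -= take * f
--         f -= 1
--     return answer
-- ===== Notes on version B (the rewrite author's own statement) =====
-- stated objective: alternative
-- what changed: Instead of sorting the frequency values and subtracting them one per loop iteration, B builds a counting bucket array indexed by frequency (frequencies are bounded by n) and scans frequencies high-to-low taking min(bucket[f], ceil(k/f)) whole types per step; B avoids the comparison sort but is not measurably faster in CPython, where the sort runs in C.
import Mathlib
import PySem

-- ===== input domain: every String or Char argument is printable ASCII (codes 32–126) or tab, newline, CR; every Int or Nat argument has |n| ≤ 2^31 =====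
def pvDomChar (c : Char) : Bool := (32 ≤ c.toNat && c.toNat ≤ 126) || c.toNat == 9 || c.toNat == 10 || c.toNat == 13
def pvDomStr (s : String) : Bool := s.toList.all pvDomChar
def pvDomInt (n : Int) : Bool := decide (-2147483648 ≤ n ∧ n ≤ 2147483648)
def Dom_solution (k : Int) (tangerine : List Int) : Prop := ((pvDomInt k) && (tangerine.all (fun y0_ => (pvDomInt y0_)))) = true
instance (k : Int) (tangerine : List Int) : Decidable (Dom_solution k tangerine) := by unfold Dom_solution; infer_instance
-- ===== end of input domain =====

-- B replaces A's comparison sort of the frequency values by a counting bucket array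
-- indexed by frequency (frequencies are bounded by len(tangerine)) and a bucket-at-a-time
-- greedy scan: an alternative algorithm with no sort (not measurably faster in CPython).

-- ===== PORT A =====
-- A's while loop: `while 0 < k: k -= lst[answer]; answer += 1` walks lst front to back.
-- On the [] case with 0 < k Python raises IndexError (excluded by Pre_solution); the port returns the accumulator there.
def solnLoopA : List Int → Int → Int → Int
  | [], _, answer => answer
  | c :: rest, k, answer => if 0 < k then solnLoopA rest (k - c) (answer + 1) else answer

def solution (k : Int) (tangerine : List Int) : Int :=
  let dic := tangerine.foldl
    (fun d tan => if d.getD tan 0 ≠ 0 then d.insert tan (d.getD tan 0 + 1) else d.insert tan 1)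
    PySem.Dict.empty
  let lst := PySem.List.sorted dic.values (fun x => x) true
  solnLoopA lst k 0

-- ===== PORT B =====
-- `while k > 0 and f > 0: take = min(bucket[f], -(-k // f)); answer += take; k -= take*f; f -= 1`
def solnLoopB (bucket : List Int) : Int → Nat → Int → Int
  | _, 0, answer => answer
  | k, f + 1, answer =>
    if 0 < k then
      let take := min (bucket.getD (f + 1) 0) (-(PySem.Int.floordiv (-k) ((f : Int) + 1)))
      solnLoopB bucket (k - take * ((f : Int) + 1)) f (answer + take)
    else answer

def solution_alt (k : Int) (tangerine : List Int) : Int :=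
  let freq := tangerine.foldl (fun d t => d.insert t (d.getD t 0 + 1)) PySem.Dict.empty
  let n := tangerine.length
  -- `bucket[c] += 1`: every value c of freq satisfies 1 ≤ c ≤ n < bucket.length, so
  -- List.set/getD at index c.toNat is exactly Python's bucket[c].
  let bucket := freq.values.foldl
    (fun (b : List Int) (c : Int) => b.set c.toNat (b.getD c.toNat 0 + 1))
    (List.replicate (n + 1) (0 : Int))
  solnLoopB bucket k n 0

-- ===== PRECONDITION & SPEC =====
-- Pre_ excludes exactly the inputs where A raises IndexError: k larger than the total
-- number of tangerines (the sorted frequency list is exhausted while 0 < k).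
def Pre_solution (k : Int) (tangerine : List Int) : Prop := k ≤ (tangerine.length : Int)
instance (k : Int) (tangerine : List Int) : Decidable (Pre_solution k tangerine) := by
  unfold Pre_solution; infer_instance

def pvWitness_solution : Int × List Int := (2, [1, 1, 2])

def Spec_solution (k : Int) (tangerine : List Int) (out : Int) : Prop := out = solution_alt k tangerine
instance (k : Int) (tangerine : List Int) (out : Int) : Decidable (Spec_solution k tangerine out) := by
  unfold Spec_solution; infer_instance

-- ===== CLAIM (what is proved, stated in full; the proofs are below) =====
def Claim_equal_solution : Prop := ∀ (k : Int) (tangerine : List Int), Dom_solution k tangerine → Pre_solution k tangerine → Spec_solution k tangerine (solution k tangerine)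

-- ===== LEMMAS AND PROOFS =====

-- the descending run of buckets: replicate (count n) n ++ ... ++ replicate (count 1) 1
def pvBlocks (V : List Int) : Nat → List Int
  | 0 => []
  | f + 1 => List.replicate (V.count ((f : Int) + 1)) ((f : Int) + 1) ++ pvBlocks V f

theorem pvBlocks_count (V : List Int) (f : Nat) (x : Int) :
    (pvBlocks V f).count x = if 1 ≤ x ∧ x ≤ (f : Int) then V.count x else 0 := by
  induction f with
  | zero =>
    simp only [pvBlocks, List.count_nil, Nat.cast_zero]
    rw [if_neg (by omega)]
  | succ f ih =>
    rw [pvBlocks, List.count_append, List.count_replicate, ih]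
    by_cases h1 : x = (f : Int) + 1
    · rw [if_pos (by simp [h1]), if_neg (by omega), if_pos (by omega), h1]
      omega
    · rw [if_neg (by simp [h1]; omega)]
      by_cases h2 : 1 ≤ x ∧ x ≤ (f : Int)
      · rw [if_pos h2, if_pos (by omega)]
        omega
      · rw [if_neg h2, if_neg (by omega)]

theorem pvBlocks_mem (V : List Int) (f : Nat) (x : Int) (hx : x ∈ pvBlocks V f) :
    1 ≤ x ∧ x ≤ (f : Int) := by
  have hc := pvBlocks_count V f x
  by_cases h : 1 ≤ x ∧ x ≤ (f : Int)
  · exact h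
  · rw [if_neg h] at hc
    exact absurd hc (List.count_pos_iff.mpr hx).ne'

theorem pvBlocks_perm (V : List Int) (f : Nat)
    (hb : ∀ v ∈ V, 1 ≤ v ∧ v ≤ (f : Int)) : (pvBlocks V f).Perm V := by
  rw [List.perm_iff_count]
  intro x
  rw [pvBlocks_count]
  by_cases h : 1 ≤ x ∧ x ≤ (f : Int)
  · rw [if_pos h]
  · rw [if_neg h]
    by_cases hm : x ∈ V
    · exact absurd (hb x hm) h
    · simp [List.count_eq_zero_of_not_mem hm]

theorem pvBlocks_pairwise (V : List Int) (f : Nat) :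
    (pvBlocks V f).Pairwise (fun a b => b ≤ a) := by
  induction f with
  | zero => simp [pvBlocks]
  | succ f ih =>
    rw [pvBlocks, List.pairwise_append]
    refine ⟨List.pairwise_replicate.mpr (Or.inr le_rfl), ih, ?_⟩
    intro a ha b hb
    have h1 := pvBlocks_mem V f b hb
    have h2 : a = (f : Int) + 1 := List.eq_of_mem_replicate ha
    omega

-- the sorted-descending frequency list IS the block list
theorem pv_sorted_eq_blocks (V : List Int) (n : Nat)
    (hb : ∀ v ∈ V, 1 ≤ v ∧ v ≤ (n : Int)) :
    PySem.List.sorted V (fun x => x) true = pvBlocks V n := by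
  refine List.Perm.eq_of_pairwise (le := fun a b : Int => b ≤ a)
    (fun a b _ _ h1 h2 => le_antisymm h2 h1)
    (PySem.List.sorted_pairwise_rev V (fun x => x)) (pvBlocks_pairwise V n) ?_
  exact (PySem.List.sorted_perm V (fun x => x) true).trans (pvBlocks_perm V n hb).symm

-- ceiling division -(-k // F) bracket: (q-1)*F < k ≤ q*F
theorem pv_ceil_bounds (k F : Int) (hF : 0 < F) :
    ((-(PySem.Int.floordiv (-k) F)) - 1) * F < k ∧ k ≤ (-(PySem.Int.floordiv (-k) F)) * F := by
  have h1 := PySem.Int.floordiv_mul_add_mod (-k) F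
  have h2 := PySem.Int.mod_nonneg (-k) hF
  have h3 := PySem.Int.mod_lt (-k) hF
  constructor <;> nlinarith

theorem pv_bracket_unique (k F a b : Int) (hF : 0 < F)
    (ha : (a - 1) * F < k ∧ k ≤ a * F) (hb : (b - 1) * F < k ∧ k ≤ b * F) : a = b := by
  have h1 : a - 1 < b := lt_of_mul_lt_mul_right (lt_of_lt_of_le ha.1 hb.2) (le_of_lt hF)
  have h2 : b - 1 < a := lt_of_mul_lt_mul_right (lt_of_lt_of_le hb.1 ha.2) (le_of_lt hF)
  omega

theorem pv_ceil_pos (k F : Int) (hF : 0 < F) (hk : 0 < k) :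
    0 < -(PySem.Int.floordiv (-k) F) := by
  have hq := pv_ceil_bounds k F hF
  by_contra h
  push_neg at h
  nlinarith [hq.2]

theorem pv_aloop_nonpos (l : List Int) (k answer : Int) (hk : ¬ 0 < k) :
    solnLoopA l k answer = answer := by
  cases l with
  | nil => rfl
  | cons c rest => simp [solnLoopA, hk]

theorem pv_aloop_replicate (F : Int) (hF : 0 < F) (c : Nat) :
    ∀ (rest : List Int) (k answer : Int), 0 < k →
    solnLoopA (List.replicate c F ++ rest) k answer =
      solnLoopA rest (k - min (c : Int) (-(PySem.Int.floordiv (-k) F)) * F)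
        (answer + min (c : Int) (-(PySem.Int.floordiv (-k) F))) := by
  induction c with
  | zero =>
    intro rest k answer hk
    have hq1 := pv_ceil_pos k F hF hk
    simp only [List.replicate_zero, List.nil_append, Nat.cast_zero]
    rw [min_eq_left (by omega), zero_mul, sub_zero, add_zero]
  | succ c ih =>
    intro rest k answer hk
    rw [List.replicate_succ, List.cons_append]
    simp only [solnLoopA]
    rw [if_pos hk]
    have hq := pv_ceil_bounds k F hF
    have hq1 := pv_ceil_pos k F hF hk
    by_cases hkF : 0 < k - F
    · rw [ih rest (k - F) (answer + 1) hkF]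
      have hq'b := pv_ceil_bounds (k - F) F hF
      have hq'eq : -(PySem.Int.floordiv (-(k - F)) F) = -(PySem.Int.floordiv (-k) F) - 1 := by
        refine pv_bracket_unique (k - F) F _ _ hF hq'b ⟨?_, ?_⟩ <;> nlinarith [hq.1, hq.2]
      rw [hq'eq]
      congr 1
      · push_cast
        rw [show min ((c : Int) + 1) (-(PySem.Int.floordiv (-k) F))
              = min (c : Int) (-(PySem.Int.floordiv (-k) F) - 1) + 1 by omega]
        ring
      · push_cast
        omega
    · have hqeq : -(PySem.Int.floordiv (-k) F) = 1 := by
        refine pv_bracket_unique k F _ _ hF hq ⟨by nlinarith, by nlinarith⟩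
      have hmin : min ((c : Int) + 1) (-(PySem.Int.floordiv (-k) F)) = 1 := by
        rw [hqeq]; omega
      push_cast
      rw [hmin, one_mul, pv_aloop_nonpos _ _ _ hkF, pv_aloop_nonpos _ _ _ hkF]

theorem pv_loop_eq (V bucket : List Int) (n : Nat)
    (hb : ∀ i : Nat, 1 ≤ i → i ≤ n → bucket.getD i 0 = (V.count (i : Int) : Int)) :
    ∀ (f : Nat), f ≤ n → ∀ (k answer : Int),
      solnLoopA (pvBlocks V f) k answer = solnLoopB bucket k f answer := by
  intro f
  induction f with
  | zero => intro _ k answer; rfl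
  | succ f ih =>
    intro hf k answer
    by_cases hk : 0 < k
    · rw [pvBlocks,
        pv_aloop_replicate ((f : Int) + 1) (by positivity) _ (pvBlocks V f) k answer hk,
        ih (by omega)]
      simp only [solnLoopB]
      rw [if_pos hk, hb (f + 1) (by omega) (by omega)]
      push_cast
      ring_nf
    · rw [pv_aloop_nonpos _ _ _ hk]
      simp [solnLoopB, hk]

theorem pv_bucket_getD (V : List Int) :
    ∀ (init : List Int) (i : Nat), i < init.length → (∀ v ∈ V, 0 ≤ v ∧ v.toNat < init.length) →
    (V.foldl (fun (b : List Int) (c : Int) => b.set c.toNat (b.getD c.toNat 0 + 1)) init).getD i 0 =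
      init.getD i 0 + (V.count (i : Int) : Int) := by
  induction V with
  | nil => intro init i _ _; simp
  | cons c rest ih =>
    intro init i hi hv
    have hc := hv c List.mem_cons_self
    rw [List.foldl_cons, List.count_cons,
      ih _ i (by simpa using hi) (fun v hv' => by simpa using hv v (List.mem_cons_of_mem _ hv'))]
    by_cases hci : c = (i : Int)
    · rw [if_pos (by simp [hci])]
      have hs : (init.set c.toNat (init.getD c.toNat 0 + 1)).getD i 0 = init.getD i 0 + 1 := by
        have hseq : c.toNat = i := by omega
        rw [hseq]
        simp [List.getD_eq_getElem?_getD, hi]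
      rw [hs]
      push_cast
      ring
    · rw [if_neg (by simp [hci])]
      have hs : (init.set c.toNat (init.getD c.toNat 0 + 1)).getD i 0 = init.getD i 0 := by
        have hne : c.toNat ≠ i := by omega
        simp [List.getD_eq_getElem?_getD, hne]
      rw [hs]
      push_cast
      ring

-- A's dict-building step equals B's (`x + 1 if cond else 1` collapses: when the count is 0, 0 + 1 = 1)
theorem pv_dic_eq (tangerine : List Int) :
    tangerine.foldl
      (fun d tan => if d.getD tan 0 ≠ 0 then d.insert tan (d.getD tan 0 + 1) else d.insert tan 1)
      (PySem.Dict.empty : PySem.Dict Int Int)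
    = tangerine.foldl (fun d t => d.insert t (d.getD t 0 + 1)) (PySem.Dict.empty : PySem.Dict Int Int) := by
  congr 1
  funext d tan
  by_cases h : d.getD tan 0 = 0 <;> simp [h]

theorem pv_values_counter (l : List Int) :
    (PySem.Dict.counter l).values = (PySem.Set.ofList l).map (fun t => (l.count t : Int)) := by
  simp [PySem.Dict.values, PySem.Dict.items_counter, Function.comp]

theorem pv_values_bounds (l : List Int) (v : Int)
    (hv : v ∈ (PySem.Dict.counter l).values) : 1 ≤ v ∧ v ≤ (l.length : Int) := by
  rw [pv_values_counter] at hv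
  obtain ⟨t, ht, rfl⟩ := List.mem_map.mp hv
  have htl : t ∈ l := by
    have := PySem.Set.mem_ofList (xs := l) (y := t)
    tauto
  have h1 : 0 < l.count t := List.count_pos_iff.mpr htl
  have h2 : l.count t ≤ l.length := List.count_le_length
  omega

-- ===== VERDICT (by name: the statement is the Claim_ definition above) =====
theorem solution_spec : Claim_equal_solution := by
  intro k tangerine _ _
  unfold Spec_solution
  simp only [solution, solution_alt]
  rw [pv_dic_eq, PySem.Dict.foldl_insert_getD_add_one_eq_counter]
  have hbounds : ∀ v ∈ (PySem.Dict.counter tangerine).values,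
      1 ≤ v ∧ v ≤ (tangerine.length : Int) := fun v hv => pv_values_bounds tangerine v hv
  rw [pv_sorted_eq_blocks _ tangerine.length hbounds]
  refine pv_loop_eq _ _ tangerine.length (fun i h1 h2 => ?_) tangerine.length le_rfl k 0
  rw [pv_bucket_getD _ _ i (by simp; omega)
    (fun v hv => by
      have := hbounds v hv
      simp only [List.length_replicate]
      omega)]
  simp
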